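-- pv_equiv track=rewrite | github.com/Jodast11/AdventOfCode | python/2015/3/solution2.py | getVisitedHouses
-- ===== SOURCE A (Python) =====
-- def getVisitedHouses(instructions):
--     xPos = 0
--     yPos = 0
--
--     visitedHouses = [(xPos,yPos)]
--
--     for instruction in instructions:
--         if instruction == "^":
--             yPos += 1
--         if instruction == "v":
--             yPos -= 1
--         if instruction == ">":
--             xPos += 1
--         if instruction == "<":
--             xPos -= 1
--
--         visitedHouses.append((xPos,yPos))
--
--     return list(dict.fromkeys(visitedHouses))
-- ===== SOURCE B (Python) =====
-- _DELTAS = {"^": (0, 1), "v": (0, -1), ">": (1, 0), "<": (-1, 0)}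
--
-- def getVisitedHouses(instructions):
--     xPos = 0
--     yPos = 0
--     seen = {(0, 0)}
--     result = [(0, 0)]
--
--     for instruction in instructions:
--         dx, dy = _DELTAS.get(instruction, (0, 0))
--         xPos += dx
--         yPos += dy
--         if (xPos, yPos) not in seen:
--             seen.add((xPos, yPos))
--             result.append((xPos, yPos))
--
--     return result
-- ===== Notes on version B (the rewrite author's own statement) =====
-- stated objective: simpler
-- what changed: B deduplicates during the single walk with a seen-set and a membership branch instead of building the full position list and running a separate dict.fromkeys dedup pass afterwards.
import Mathlib
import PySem

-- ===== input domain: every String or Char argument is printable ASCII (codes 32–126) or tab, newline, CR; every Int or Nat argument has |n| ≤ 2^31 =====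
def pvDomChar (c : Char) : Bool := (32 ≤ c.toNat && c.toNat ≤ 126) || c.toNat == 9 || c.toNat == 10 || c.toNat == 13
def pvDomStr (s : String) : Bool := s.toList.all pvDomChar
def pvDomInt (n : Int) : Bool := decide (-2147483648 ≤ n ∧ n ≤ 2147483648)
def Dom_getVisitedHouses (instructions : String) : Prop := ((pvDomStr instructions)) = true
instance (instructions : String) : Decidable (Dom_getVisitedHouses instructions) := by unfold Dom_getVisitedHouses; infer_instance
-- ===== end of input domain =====

-- B replaces A's if-chain walk + trailing dict.fromkeys dedup pass with a table-driven walk that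
-- deduplicates on the fly (seen-set + membership branch); simpler one-pass decomposition, same return value.

-- ===== PORT A =====
-- one loop iteration of A: the four independent ifs move the position, then append it to visitedHouses
def pvStepA (s : Int × Int × List (Int × Int)) (c : Char) : Int × Int × List (Int × Int) :=
  let y := if c = '^' then s.2.1 + 1 else s.2.1
  let y := if c = 'v' then y - 1 else y
  let x := if c = '>' then s.1 + 1 else s.1
  let x := if c = '<' then x - 1 else x
  (x, y, s.2.2 ++ [(x, y)])

def getVisitedHouses (instructions : String) : List (Int × Int) :=
  let st := instructions.toList.foldl pvStepA (0, 0, [((0 : Int), (0 : Int))])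
  PySem.List.dedup st.2.2   -- list(dict.fromkeys(visitedHouses))

-- ===== PORT B =====
-- B's module-level _DELTAS table
def pvDeltas : PySem.Dict Char (Int × Int) :=
  PySem.Dict.ofList [('^', (0, 1)), ('v', (0, -1)), ('>', (1, 0)), ('<', (-1, 0))]

-- one loop iteration of B: table-driven move, then append only if unseen
def pvStepB (s : Int × Int × PySem.Set (Int × Int) × List (Int × Int)) (c : Char) :
    Int × Int × PySem.Set (Int × Int) × List (Int × Int) :=
  let d := PySem.Dict.getD pvDeltas c (0, 0)
  let x := s.1 + d.1
  let y := s.2.1 + d.2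
  if PySem.Set.contains s.2.2.1 (x, y) then (x, y, s.2.2.1, s.2.2.2)
  else (x, y, PySem.Set.add s.2.2.1 (x, y), s.2.2.2 ++ [(x, y)])

def getVisitedHouses_alt (instructions : String) : List (Int × Int) :=
  let st := instructions.toList.foldl pvStepB
    (0, 0, PySem.Set.ofList [((0 : Int), (0 : Int))], [((0 : Int), (0 : Int))])
  st.2.2.2

-- ===== PRECONDITION & SPEC =====
def Spec_getVisitedHouses (instructions : String) (out : List (Int × Int)) : Prop := out = getVisitedHouses_alt instructions
instance (instructions : String) (out : List (Int × Int)) : Decidable (Spec_getVisitedHouses instructions out) := by unfold Spec_getVisitedHouses; infer_instance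

-- ===== CLAIM (what is proved, stated in full; the proofs are below) =====
def Claim_equal_getVisitedHouses : Prop := ∀ (instructions : String), Dom_getVisitedHouses instructions → Spec_getVisitedHouses instructions (getVisitedHouses instructions)

-- ===== LEMMAS AND PROOFS =====

-- a character that is none of the four arrows moves nothing in B's table
lemma pvDeltas_other (c : Char) (h1 : ¬ c = '^') (h2 : ¬ c = 'v') (h3 : ¬ c = '>') (h4 : ¬ c = '<') :
    PySem.Dict.getD pvDeltas c (0, 0) = ((0 : Int), (0 : Int)) := by
  rw [show pvDeltas = PySem.Dict.mk [('^', ((0:Int), (1:Int))), ('v', (0, -1)), ('>', (1, 0)), ('<', (-1, 0))] from rfl]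
  simp [PySem.Dict.getD_eq_get?_getD, PySem.Dict.get?,
    Ne.symm h1, Ne.symm h2, Ne.symm h3, Ne.symm h4]

-- appending one position to the walked list commutes with the ordered dedup
lemma ofList_append_singleton (vs : List (Int × Int)) (p : Int × Int) :
    PySem.Set.ofList (vs ++ [p]) = if p ∈ vs then PySem.Set.ofList vs else PySem.Set.ofList vs ++ [p] := by
  rw [PySem.Set.ofList_eq_foldl, List.foldl_append, ← PySem.Set.ofList_eq_foldl]
  by_cases hp : p ∈ vs
  · simp [PySem.Set.add, PySem.Set.contains, PySem.Set.mem_ofList, hp]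
  · simp [PySem.Set.add, PySem.Set.contains, PySem.Set.mem_ofList, hp]

-- loop invariant: B's fold state mirrors A's, with seen = result = dedup of A's visited list
lemma fold_invariant (l : List Char) : ∀ (x y : Int) (vs : List (Int × Int)),
    l.foldl pvStepB (x, y, PySem.List.dedup vs, PySem.List.dedup vs) =
      ((l.foldl pvStepA (x, y, vs)).1, (l.foldl pvStepA (x, y, vs)).2.1,
       PySem.List.dedup (l.foldl pvStepA (x, y, vs)).2.2,
       PySem.List.dedup (l.foldl pvStepA (x, y, vs)).2.2) := by
  induction l with
  | nil => intro x y vs; simp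
  | cons c l ih =>
    intro x y vs
    simp only [List.foldl_cons]
    have hB : pvStepB (x, y, PySem.List.dedup vs, PySem.List.dedup vs) c =
        ((pvStepA (x, y, vs) c).1, (pvStepA (x, y, vs) c).2.1,
         PySem.List.dedup (pvStepA (x, y, vs) c).2.2,
         PySem.List.dedup (pvStepA (x, y, vs) c).2.2) := by
      by_cases h1 : c = '^'
      · subst h1
        simp [pvStepA, pvStepB, show PySem.Dict.getD pvDeltas '^' (0, 0) = ((0:Int), (1:Int)) from by decide,
          PySem.List.dedup_eq_ofList, ofList_append_singleton, PySem.Set.add,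
          PySem.Set.contains, PySem.Set.mem_ofList]
        split_ifs <;> simp_all
      · by_cases h2 : c = 'v'
        · subst h2
          simp [pvStepA, pvStepB, show PySem.Dict.getD pvDeltas 'v' (0, 0) = ((0:Int), (-1:Int)) from by decide,
            PySem.List.dedup_eq_ofList, ofList_append_singleton, PySem.Set.add,
            PySem.Set.contains, PySem.Set.mem_ofList, sub_eq_add_neg]
          split_ifs <;> simp_all
        · by_cases h3 : c = '>'
          · subst h3
            simp [pvStepA, pvStepB, show PySem.Dict.getD pvDeltas '>' (0, 0) = ((1:Int), (0:Int)) from by decide,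
              PySem.List.dedup_eq_ofList, ofList_append_singleton, PySem.Set.add,
              PySem.Set.contains, PySem.Set.mem_ofList]
            split_ifs <;> simp_all
          · by_cases h4 : c = '<'
            · subst h4
              simp [pvStepA, pvStepB, show PySem.Dict.getD pvDeltas '<' (0, 0) = ((-1:Int), (0:Int)) from by decide,
                PySem.List.dedup_eq_ofList, ofList_append_singleton, PySem.Set.add,
                PySem.Set.contains, PySem.Set.mem_ofList, sub_eq_add_neg]
              split_ifs <;> simp_all
            · simp [pvStepA, pvStepB, pvDeltas_other c h1 h2 h3 h4, h1, h2, h3, h4,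
                PySem.List.dedup_eq_ofList, ofList_append_singleton, PySem.Set.add,
                PySem.Set.contains, PySem.Set.mem_ofList]
              split_ifs <;> simp_all
    rw [hB, ih]

-- ===== VERDICT (by name: the statement is the Claim_ definition above) =====
theorem getVisitedHouses_spec : Claim_equal_getVisitedHouses := by
  intro instructions _
  unfold Spec_getVisitedHouses getVisitedHouses getVisitedHouses_alt
  have h0 : PySem.Set.ofList [((0 : Int), (0 : Int))] = PySem.List.dedup [((0 : Int), (0 : Int))] := by
    simp [PySem.List.dedup_eq_ofList]
  rw [h0]
  have := fold_invariant instructions.toList 0 0 [((0 : Int), (0 : Int))]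
  rw [show PySem.List.dedup [((0:Int),(0:Int))] = [((0:Int),(0:Int))] from rfl] at this ⊢
  rw [this]
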